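-- pv_equiv track=rewrite | github.com/mathsly-research/base_statistics_staging | pages/16_🧩_SEM_Structural_Equation_Modeling.py | unique_tokens
-- ===== SOURCE A (Python) =====
-- def unique_tokens(tokens: list[str]) -> list[str]:
--     """Rende univoci i token aggiungendo suffissi _1, _2 in caso di collisioni."""
--     seen = {}
--     out = []
--     for t in tokens:
--         base = t
--         i = seen.get(base, 0)
--         if i > 0:
--             t = f"{base}_{i}"
--         out.append(t)
--         seen[base] = i + 1
--     return out
-- ===== SOURCE B (Python) =====
-- def unique_tokens(tokens: list[str]) -> list[str]:
--     """Rende univoci i token aggiungendo suffissi _1, _2 in caso di collisioni."""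
--     positions = {}
--     for i, t in enumerate(tokens):
--         positions.setdefault(t, []).append(i)
--     out = [""] * len(tokens)
--     for base, idxs in positions.items():
--         for j, pos in enumerate(idxs):
--             out[pos] = base if j == 0 else f"{base}_{j}"
--     return out
-- ===== Notes on version B (the rewrite author's own statement) =====
-- stated objective: alternative
-- what changed: Replaces A's single stateful pass with a running seen-counter dict by a two-phase group-then-scatter: one pass groups each base token to its ordered occurrence index list, a second pass writes base (first occurrence) or base_j (j-th occurrence) directly into a preallocated output slot at each recorded index.
import Mathlib
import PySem

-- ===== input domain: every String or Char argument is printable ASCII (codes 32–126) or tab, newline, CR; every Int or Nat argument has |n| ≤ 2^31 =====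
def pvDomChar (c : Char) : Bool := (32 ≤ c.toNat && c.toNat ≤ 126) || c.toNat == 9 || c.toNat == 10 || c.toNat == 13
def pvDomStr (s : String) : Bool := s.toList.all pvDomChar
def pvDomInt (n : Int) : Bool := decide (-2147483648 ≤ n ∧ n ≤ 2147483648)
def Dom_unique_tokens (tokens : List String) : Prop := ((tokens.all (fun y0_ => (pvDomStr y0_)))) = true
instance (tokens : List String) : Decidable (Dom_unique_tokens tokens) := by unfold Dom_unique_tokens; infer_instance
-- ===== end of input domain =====

-- B replaces A's single stateful pass (running seen-counter dict) by a two-phase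
-- group-then-scatter: group each base to its ordered index list, then write the
-- suffixed names into a preallocated output (alternative decomposition; same cost).

-- ===== PORT A =====
def unique_tokens (tokens : List String) : List String :=
  (tokens.foldl
    (fun (st : PySem.Dict String Int × List String) t =>
      let seen := st.1
      let out := st.2
      let base := t
      let i := seen.getD base 0
      let t' := if i > 0 then base ++ "_" ++ PySem.Int.toStr i else t
      (seen.insert base (i + 1), out ++ [t']))
    (PySem.Dict.empty, [])).2

-- ===== PORT B =====
def unique_tokens_alt (tokens : List String) : List String :=
  let positions : PySem.Dict String (List Int) :=
    (PySem.List.enumerate tokens).foldl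
      (fun d p => d.modify p.2 [] (fun l => l ++ [p.1])) PySem.Dict.empty
  let out0 := PySem.List.pyRepeat [""] (tokens.length : Int)
  positions.items.foldl
    (fun out pr =>
      (PySem.List.enumerate pr.2).foldl
        (fun out q =>
          PySem.List.pySetD out q.2
            (if q.1 = 0 then pr.1 else pr.1 ++ "_" ++ PySem.Int.toStr q.1))
        out)
    out0

-- ===== PRECONDITION & SPEC =====
def Spec_unique_tokens (tokens : List String) (out : List String) : Prop := out = unique_tokens_alt tokens
instance (tokens : List String) (out : List String) : Decidable (Spec_unique_tokens tokens out) := by unfold Spec_unique_tokens; infer_instance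

-- ===== CLAIM (what is proved, stated in full; the proofs are below) =====
def Claim_equal_unique_tokens : Prop := ∀ (tokens : List String), Dom_unique_tokens tokens → Spec_unique_tokens tokens (unique_tokens tokens)

-- ===== LEMMAS AND PROOFS =====

-- the intended i-th output token: the base suffixed by its occurrence count in the prefix
def tgt (tokens : List String) (i : Nat) : String :=
  if (tokens.take i).count (tokens.getD i "") = 0 then tokens.getD i ""
  else tokens.getD i "" ++ "_" ++ PySem.Int.toStr (((tokens.take i).count (tokens.getD i "") : Nat) : Int)

-- ---- A side ----

-- reference function: suffixed tokens of l given already-emitted prefix p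
def gRef (p l : List String) : List String :=
  match l with
  | [] => []
  | t :: rest =>
    let c := PySem.List.count p t
    (if c = 0 then t else t ++ "_" ++ PySem.Int.toStr c) :: gRef (p ++ [t]) rest

-- A's seen dict after processing p
def stateOf (p : List String) : PySem.Dict String Int :=
  p.foldl (fun d x => d.insert x (d.getD x 0 + 1)) PySem.Dict.empty

lemma foldA_eq_gRef : ∀ (l p acc : List String),
    (l.foldl
      (fun (st : PySem.Dict String Int × List String) t =>
        let seen := st.1
        let out := st.2
        let base := t
        let i := seen.getD base 0
        let t' := if i > 0 then base ++ "_" ++ PySem.Int.toStr i else t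
        (seen.insert base (i + 1), out ++ [t']))
      (stateOf p, acc)).2 = acc ++ gRef p l := by
  intro l
  induction l with
  | nil => intro p acc; simp [gRef]
  | cons t rest ih =>
    intro p acc
    have hi : (stateOf p).getD t 0 = PySem.List.count p t := by
      simp [stateOf, PySem.Dict.getD_foldl_insert_add_one, PySem.List.count_eq]
    have hstate : (stateOf p).insert t ((stateOf p).getD t 0 + 1) = stateOf (p ++ [t]) := by
      simp [stateOf, List.foldl_append]
    simp only [List.foldl_cons]
    show (rest.foldl _ ((stateOf p).insert t ((stateOf p).getD t 0 + 1),
        acc ++ [if (stateOf p).getD t 0 > 0 then t ++ "_" ++ PySem.Int.toStr ((stateOf p).getD t 0) else t])).2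
      = acc ++ gRef p (t :: rest)
    rw [hstate, ih]
    simp only [gRef, hi]
    simp only [PySem.List.count_eq]
    by_cases h : List.count t p = 0
    · simp [h]
    · simp [h, List.count_pos_iff.mp (Nat.pos_of_ne_zero h)]

lemma gRef_eq_map (tokens : List String) : ∀ (l p : List String), p ++ l = tokens →
    gRef p l = (List.range l.length).map (fun i => tgt tokens (p.length + i)) := by
  intro l
  induction l with
  | nil => intro p _; simp [gRef]
  | cons t rest ih =>
    intro p hp
    have hget : tokens.getD p.length "" = t := by
      rw [← hp]; simp
    have htake : tokens.take p.length = p := by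
      rw [← hp]; simp
    simp only [List.length_cons]
    rw [List.range_succ_eq_map, List.map_cons]
    have hhead : tgt tokens (p.length + 0) = (if PySem.List.count p t = 0 then t
        else t ++ "_" ++ PySem.Int.toStr (PySem.List.count p t)) := by
      simp only [Nat.add_zero, tgt, hget, htake, PySem.List.count_eq, Int.natCast_eq_zero]
    have htail : (List.map Nat.succ (List.range rest.length)).map
          (fun i => tgt tokens (p.length + i))
        = (List.range rest.length).map (fun i => tgt tokens ((p ++ [t]).length + i)) := by
      rw [List.map_map]
      refine List.map_congr_left ?_
      intro i _
      simp only [Function.comp, List.length_append, List.length_singleton]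
      congr 1
      omega
    simp only [gRef]
    rw [hhead.symm, htail, ih (p ++ [t]) (by simpa using hp)]

-- ---- B side ----

def intCastL (L : List Nat) : List Int := L.map (fun k : Nat => (k : Int))

-- the (Nat) indices at which base b occurs
def idxsNat (tokens : List String) (b : String) : List Nat :=
  (List.range tokens.length).filter (fun k => tokens.getD k "" == b)

lemma mem_idxsNat (tokens : List String) (b : String) (i : Nat) :
    i ∈ idxsNat tokens b ↔ i < tokens.length ∧ tokens.getD i "" = b := by
  simp [idxsNat]

lemma pairwise_idxsNat (tokens : List String) (b : String) :
    (idxsNat tokens b).Pairwise (· < ·) := by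
  exact List.Pairwise.sublist (List.filter_sublist) (List.pairwise_lt_range)

-- rank in a filtered range = number of earlier matches
lemma filter_range_rank (P : Nat → Bool) : ∀ (n r : Nat) (h : r < ((List.range n).filter P).length),
    ((List.range (((List.range n).filter P)[r])).filter P).length = r := by
  intro n
  induction n with
  | zero => intro r h; simp at h
  | succ m ih =>
    intro r h
    have key : (List.range (m+1)).filter P = (List.range m).filter P ++ [m].filter P := by
      rw [List.range_succ, List.filter_append]
    rw [List.getElem_of_eq key]
    have h' : r < ((List.range m).filter P ++ [m].filter P).length := by rw [← key]; exact h
    by_cases hr : r < ((List.range m).filter P).length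
    · rw [List.getElem_append_left hr]
      exact ih r hr
    · have hP : P m = true := by
        by_contra hPm
        rw [Bool.not_eq_true] at hPm
        simp only [List.length_append, List.filter_singleton, hPm] at h'
        simp at h'
        omega
      have hr' : r = ((List.range m).filter P).length := by
        have hlen1 : (([m].filter P)).length = 1 := by
          simp [List.filter_singleton, hP]
        rw [List.length_append, hlen1] at h'
        omega
      have hget : ((List.range m).filter P ++ [m].filter P)[r]'(h') = m := by
        rw [List.getElem_append_right (by omega)]
        simp [List.filter_singleton, hP, hr']
      rw [hget]
      exact hr'.symm

-- prefix count of b = number of earlier indices holding b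
lemma count_take_eq (tokens : List String) (b : String) : ∀ (i : Nat), i ≤ tokens.length →
    (tokens.take i).count b = ((List.range i).filter (fun k => tokens.getD k "" == b)).length := by
  intro i
  induction i with
  | zero => intro _; simp
  | succ m ih =>
    intro h
    have hm : m < tokens.length := by omega
    have hsome : tokens[m]?.toList = [tokens.getD m ""] := by
      rw [List.getElem?_eq_getElem hm, List.getD_eq_getElem _ _ hm]
      simp
    rw [List.take_add_one, List.range_succ, List.filter_append,
        List.count_append, ih (by omega), hsome]
    have hg : tokens.getD m "" = tokens[m] := List.getD_eq_getElem _ _ hm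
    by_cases hb : tokens.getD m "" = b
    · simp only [List.count_cons, List.count_nil, List.filter_singleton,
        List.getElem?_eq_getElem hm, Option.getD_some, ← hg, hb]
      simp
    · have hb' : ¬ tokens[m]?.getD "" = b := by
        rw [List.getD_eq_getElem?_getD] at hb
        exact hb
      simp [List.filter_singleton, hb, hb']

lemma enum_filter_fst (b : String) : ∀ (l : List String) (s : Nat),
    ((PySem.List.enumerate l (s : Int)).filter (fun p => p.2 == b)).map (·.1)
    = ((List.range l.length).filter (fun k => l.getD k "" == b)).map (fun k => ((s + k : Nat) : Int)) := by
  intro l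
  induction l with
  | nil => intro s; simp [PySem.List.enumerate_nil]
  | cons x xs ih =>
    intro s
    have hstart : ((s : Int) + 1) = ((s + 1 : Nat) : Int) := by push_cast; ring
    rw [PySem.List.enumerate_cons, hstart]
    simp only [List.length_cons, List.range_succ_eq_map, List.filter_cons,
      List.getD_cons_zero, List.getD_cons_succ]
    have hfm : (List.map Nat.succ (List.range xs.length)).filter
          (fun k => (x :: xs).getD k "" == b)
        = ((List.range xs.length).filter (fun k => xs.getD k "" == b)).map Nat.succ := by
      rw [List.filter_map]
      congr 1
    have htail : (((List.range xs.length).filter (fun k => xs.getD k "" == b)).map Nat.succ).map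
          (fun k => ((s + k : Nat) : Int))
        = ((List.range xs.length).filter (fun k => xs.getD k "" == b)).map (fun k => (((s+1) + k : Nat) : Int)) := by
      rw [List.map_map]
      refine List.map_congr_left ?_
      intro k _
      simp only [Function.comp]
      congr 1
      omega
    by_cases hx : (x == b) = true
    · simp only [hx, if_true, List.map_cons, ih (s+1)]
      rw [hfm, htail]
      simp
    · simp only [Bool.not_eq_true] at hx
      simp only [hx, Bool.false_eq_true, if_false, ih (s+1)]
      rw [hfm, htail]

-- the dict built in B's first pass maps b to its (Int) occurrence indices
lemma positions_getD (tokens : List String) (b : String) :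
    ((PySem.List.enumerate tokens).foldl
      (fun d p => d.modify p.2 [] (fun l => l ++ [p.1])) PySem.Dict.empty).getD b []
    = intCastL (idxsNat tokens b) := by
  have h1 : (PySem.List.enumerate tokens).foldl
      (fun d p => d.modify p.2 [] (fun l => l ++ [p.1])) PySem.Dict.empty
      = ((PySem.List.enumerate tokens).map (fun p => (p.2, p.1))).foldl
        (fun d p => d.modify p.1 [] (fun l => l ++ [p.2])) PySem.Dict.empty := by
    rw [List.foldl_map]
  rw [h1, PySem.Dict.getD_foldl_modify_append]
  have h2 : ((PySem.List.enumerate tokens).map (fun p => (p.2, p.1))).filter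
        (fun p => p.1 == b)
      = ((PySem.List.enumerate tokens).filter (fun p => p.2 == b)).map (fun p => (p.2, p.1)) := by
    rw [List.filter_map]
    congr 1
  rw [h2, List.map_map]
  have h3 := enum_filter_fst b tokens 0
  simp only [Nat.cast_zero, Nat.zero_add] at h3
  simpa [idxsNat, intCastL, Function.comp, PySem.Dict.getD_empty] using h3

-- writing one group touches exactly its indices, placing the intended token there
lemma writeGroup_getD (tokens : List String) (b : String) : ∀ (L : List Nat) (j : Nat) (out : List String),
    out.length = tokens.length →
    L.Pairwise (· < ·) →
    (∀ (r : Nat) (h : r < L.length), L[r] < tokens.length ∧ tokens.getD L[r] "" = b ∧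
        (tokens.take L[r]).count b = j + r) →
    ∀ i : Nat,
    ((PySem.List.enumerate (intCastL L) (j : Int)).foldl
        (fun o q => PySem.List.pySetD o q.2 (if q.1 = 0 then b else b ++ "_" ++ PySem.Int.toStr q.1)) out).getD i ""
      = if i ∈ L then tgt tokens i else out.getD i "" := by
  intro L
  induction L with
  | nil => intro j out _ _ _ i; simp [intCastL, PySem.List.enumerate_nil]
  | cons k L' ih =>
    intro j out hlen hpw hspec i
    have hspec0 := hspec 0 (by simp)
    simp only [List.getElem_cons_zero, Nat.add_zero] at hspec0
    have hstart : ((j : Int) + 1) = ((j + 1 : Nat) : Int) := by push_cast; ring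
    have hcons : intCastL (k :: L') = (k : Int) :: intCastL L' := by simp [intCastL]
    rw [hcons, PySem.List.enumerate_cons, List.foldl_cons, hstart]
    have hset : PySem.List.pySetD out (k : Int)
        (if (j : Int) = 0 then b else b ++ "_" ++ PySem.Int.toStr (j : Int))
        = out.set k (if (j : Int) = 0 then b else b ++ "_" ++ PySem.Int.toStr (j : Int)) := by
      simp
    rw [hset]
    rw [ih (j+1) _ (by rw [List.length_set]; exact hlen) ((List.pairwise_cons.mp hpw).2)
      (by
        intro r h
        have := hspec (r+1) (by simpa using Nat.succ_lt_succ h)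
        simpa [Nat.add_assoc, Nat.add_comm 1 r] using this) i]
    by_cases hiL' : i ∈ L'
    · simp [hiL']
    · by_cases hik : i = k
      · subst hik
        have hlt : i < out.length := by rw [hlen]; exact hspec0.1
        simp only [hiL', if_false, List.mem_cons, true_or, if_true]
        rw [List.getD_eq_getElem?_getD, List.getElem?_set_self hlt]
        simp only [Option.getD_some]
        have hc : (tokens.take i).count b = j := by simpa using hspec0.2.2
        simp only [tgt, hspec0.2.1, hc]
        by_cases hj : j = 0
        · simp [hj]
        · have : ¬ ((j : Int) = 0) := by exact_mod_cast hj
          simp [hj, this]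
      · have : i ∉ (k :: L') := by simp [hik, hiL']
        simp only [hiL', if_false, this, if_false]
        rw [List.getD_eq_getElem?_getD, List.getD_eq_getElem?_getD,
          List.getElem?_set_ne (fun h => hik h.symm)]

lemma write_length {α : Type} (g : α → Int) (h : α → String) : ∀ (l : List α) (out : List String),
    (l.foldl (fun o q => PySem.List.pySetD o (g q) (h q)) out).length = out.length := by
  intro l
  induction l with
  | nil => intro out; rfl
  | cons x xs ih => intro out; rw [List.foldl_cons, ih]; exact PySem.List.length_pySetD _ _ _

-- scatter over any list of bases: every index whose token is covered holds its tgt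
lemma scatter_getD (tokens : List String) : ∀ (bs : List String) (out : List String),
    out.length = tokens.length →
    ∀ i : Nat, i < tokens.length →
    (bs.foldl (fun out b =>
        (PySem.List.enumerate (intCastL (idxsNat tokens b))).foldl
          (fun o q => PySem.List.pySetD o q.2 (if q.1 = 0 then b else b ++ "_" ++ PySem.Int.toStr q.1)) out) out).getD i ""
      = if tokens.getD i "" ∈ bs then tgt tokens i else out.getD i "" := by
  intro bs
  induction bs with
  | nil => intro out _ i _; simp
  | cons b bs' ih =>
    intro out hlen i hi
    rw [List.foldl_cons]
    have hspec : ∀ (r : Nat) (h : r < (idxsNat tokens b).length),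
        (idxsNat tokens b)[r] < tokens.length ∧ tokens.getD (idxsNat tokens b)[r] "" = b ∧
        (tokens.take (idxsNat tokens b)[r]).count b = 0 + r := by
      intro r h
      have hmem : (idxsNat tokens b)[r] ∈ idxsNat tokens b := List.getElem_mem h
      have hm := (mem_idxsNat tokens b _).mp hmem
      refine ⟨hm.1, hm.2, ?_⟩
      rw [count_take_eq tokens b _ (Nat.le_of_lt hm.1), Nat.zero_add]
      exact filter_range_rank (fun k => tokens.getD k "" == b) tokens.length r h
    have hw := writeGroup_getD tokens b (idxsNat tokens b) 0 out hlen
      (pairwise_idxsNat tokens b) hspec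
    simp only [Nat.cast_zero] at hw
    rw [ih _ ((write_length _ _ _ _).trans hlen) i hi]
    rw [hw i]
    have hidx : i ∈ idxsNat tokens b ↔ tokens.getD i "" = b :=
      ⟨fun h => ((mem_idxsNat tokens b i).mp h).2,
       fun h => (mem_idxsNat tokens b i).mpr ⟨hi, h⟩⟩
    by_cases hbs : tokens.getD i "" ∈ bs'
    · rw [if_pos hbs, if_pos (List.mem_cons.mpr (Or.inr hbs))]
    · rw [if_neg hbs]
      by_cases hb : tokens.getD i "" = b
      · rw [if_pos (hidx.mpr hb), if_pos (List.mem_cons.mpr (Or.inl hb))]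
      · rw [if_neg (fun hc => hb (hidx.mp hc)),
          if_neg (fun hc => (List.mem_cons.mp hc).elim hb hbs)]

lemma scatter_length (tokens : List String) : ∀ (bs : List String) (out : List String),
    (bs.foldl (fun out b =>
        (PySem.List.enumerate (intCastL (idxsNat tokens b))).foldl
          (fun o q => PySem.List.pySetD o q.2 (if q.1 = 0 then b else b ++ "_" ++ PySem.Int.toStr q.1)) out) out).length = out.length := by
  intro bs
  induction bs with
  | nil => intro out; rfl
  | cons b bs' ih => intro out; rw [List.foldl_cons, ih]; exact write_length _ _ _ _

lemma getElem_eq_of_getD {l1 l2 : List String} (i : Nat) (h1 : i < l1.length) (h2 : i < l2.length)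
    (h : l1.getD i "" = l2.getD i "") : l1[i] = l2[i] := by
  rwa [List.getD_eq_getElem _ _ h1, List.getD_eq_getElem _ _ h2] at h

-- ===== VERDICT (by name: the statement is the Claim_ definition above) =====
theorem unique_tokens_spec : Claim_equal_unique_tokens := by
  intro tokens _
  unfold Spec_unique_tokens
  -- A's result is the map of tgt over all indices
  have hA : unique_tokens tokens = (List.range tokens.length).map (tgt tokens) := by
    have h1 := foldA_eq_gRef tokens [] []
    simp only [stateOf, List.foldl_nil] at h1
    unfold unique_tokens
    rw [h1, gRef_eq_map tokens tokens [] rfl]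
    simp
  -- B's result is the same map
  have hnd : ((PySem.List.enumerate tokens).foldl
      (fun d p => d.modify p.2 [] (fun l => l ++ [p.1])) PySem.Dict.empty).keys.Nodup := by
    apply PySem.Dict.nodup_keys_foldl_modify_key
    exact PySem.Dict.nodup_keys_empty
  have hkeys : ((PySem.List.enumerate tokens).foldl
      (fun d p => d.modify p.2 [] (fun l => l ++ [p.1])) PySem.Dict.empty).keys
      = PySem.Set.ofList tokens := by
    rw [PySem.Dict.keys_foldl_modify_key]
    simp only [PySem.Dict.keys_empty, PySem.List.map_snd_enumerate]
    rw [PySem.Set.ofList_eq_foldl]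
    rfl
  have hitems := PySem.Dict.items_eq_map_keys _ hnd ([] : List Int)
  have hB : unique_tokens_alt tokens = (List.range tokens.length).map (tgt tokens) := by
    show (List.foldl
        (fun out pr =>
          List.foldl
            (fun out q => PySem.List.pySetD out q.2
              (if q.1 = 0 then pr.1 else pr.1 ++ "_" ++ PySem.Int.toStr q.1)) out
            (PySem.List.enumerate pr.2))
        (PySem.List.pyRepeat [""] (tokens.length : Int))
        ((List.foldl (fun d p => d.modify p.2 [] fun l => l ++ [p.1]) PySem.Dict.empty
          (PySem.List.enumerate tokens)).items))
      = List.map (tgt tokens) (List.range tokens.length)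
    rw [hitems, List.foldl_map]
    have hfuneq : (fun (out : List String) (b : String) =>
          (PySem.List.enumerate (((PySem.List.enumerate tokens).foldl
              (fun d p => d.modify p.2 [] (fun l => l ++ [p.1])) PySem.Dict.empty).getD b [])).foldl
            (fun o q => PySem.List.pySetD o q.2
              (if q.1 = 0 then b else b ++ "_" ++ PySem.Int.toStr q.1)) out)
        = (fun (out : List String) (b : String) =>
          (PySem.List.enumerate (intCastL (idxsNat tokens b))).foldl
            (fun o q => PySem.List.pySetD o q.2
              (if q.1 = 0 then b else b ++ "_" ++ PySem.Int.toStr q.1)) out) := by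
      funext out b
      rw [positions_getD]
    rw [hfuneq, hkeys]
    have hrep : PySem.List.pyRepeat [""] ((tokens.length : Nat) : Int)
        = List.replicate tokens.length "" := by
      rw [PySem.List.pyRepeat_singleton]
      simp
    rw [hrep]
    have hlen0 : (List.replicate tokens.length "").length = tokens.length :=
      List.length_replicate
    apply List.ext_getElem
    · rw [scatter_length]
      simp
    · intro i h1 h2
      have hi : i < tokens.length := by
        rw [scatter_length, List.length_replicate] at h1
        exact h1
      apply getElem_eq_of_getD i h1 h2
      rw [scatter_getD tokens _ _ hlen0 i hi]
      have hmem : tokens.getD i "" ∈ PySem.Set.ofList tokens := by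
        rw [PySem.Set.mem_ofList]
        rw [List.getD_eq_getElem _ _ hi]
        exact List.getElem_mem hi
      rw [if_pos hmem, List.getD_eq_getElem _ _ h2, List.getElem_map, List.getElem_range]
  rw [hA, hB]
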